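-- pv_equiv track=rewrite | github.com/ishitachaturvedi/gpgpu-sim_distribution | fast_v2_indep_SM_sched.py | init_six
-- ===== SOURCE A (Python) =====
-- def init_six(num_shaders,num_sched,numStalls):
--     warp_six_c = []
--     for shader in range(num_shaders):
--         warp_shader = []
--         for sched in range(num_sched):
--             warp_sched = []
--             for i in range(numStalls):
--                 stall1 = []
--                 for j in range(i+1,numStalls):
--                     stall2 = []
--                     for k in range(j+1,numStalls):
--                         stall3 = []
--                         for k1 in range(k+1,numStalls):
--                             stall4 = []
--                             for k2 in range(k1+1,numStalls):
--                                 stall5 = []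
--                                 for k3 in range(k2+1,numStalls):
--                                     stall5.append(0)
--                                 stall4.append(stall5)
--                             stall3.append(stall4)
--                         stall2.append(stall3)
--                     stall1.append(stall2)
--                 warp_sched.append(stall1)
--             warp_shader.append(warp_sched)
--         warp_six_c.append(warp_shader)
--     return warp_six_c
-- ===== SOURCE B (Python) =====
-- def init_six(num_shaders, num_sched, numStalls):
--     # depth recursion replaces the six hand-written nested append loops
--     def build(depth, start):
--         if depth == 0:
--             return 0
--         return [build(depth - 1, i) for i in range(start + 1, numStalls)]
--     return [[build(6, -1) for _ in range(num_sched)] for _ in range(num_shaders)]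
-- ===== Notes on version B (the rewrite author's own statement) =====
-- stated objective: simpler
-- what changed: Replaces the six copy-pasted nested append loops by a single recursive build(depth,start) helper that descends over the remaining depth.
import Mathlib
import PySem

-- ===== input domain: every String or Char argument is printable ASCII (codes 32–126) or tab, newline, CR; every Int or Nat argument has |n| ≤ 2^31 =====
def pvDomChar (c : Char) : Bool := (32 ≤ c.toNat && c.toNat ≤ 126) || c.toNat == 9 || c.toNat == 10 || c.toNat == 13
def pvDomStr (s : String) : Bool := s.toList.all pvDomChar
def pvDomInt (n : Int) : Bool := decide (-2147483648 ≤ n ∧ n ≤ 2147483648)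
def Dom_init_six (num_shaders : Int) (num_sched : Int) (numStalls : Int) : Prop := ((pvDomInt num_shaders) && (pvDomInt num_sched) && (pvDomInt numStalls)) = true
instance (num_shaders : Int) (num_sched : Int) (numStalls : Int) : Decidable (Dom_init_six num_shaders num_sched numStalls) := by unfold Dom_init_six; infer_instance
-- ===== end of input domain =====

abbrev PvOut : Type := List (List (List (List (List (List (List (List Int)))))))

-- B replaces A's six copy-pasted nested append loops by one depth-recursive builder
-- (unrolled per depth level in this port); objective: simpler.

-- ===== PORT A =====
def init_six (num_shaders : Int) (num_sched : Int) (numStalls : Int) : List (List (List (List (List (List (List (List Int))))))) :=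
  (PySem.List.pyRange 0 num_shaders 1).foldl (fun warp_six_c _shader => warp_six_c ++ [(PySem.List.pyRange 0 num_sched 1).foldl (fun warp_shader _sched => warp_shader ++ [(PySem.List.pyRange 0 numStalls 1).foldl (fun warp_sched i => warp_sched ++ [(PySem.List.pyRange (i+1) numStalls 1).foldl (fun stall1 j => stall1 ++ [(PySem.List.pyRange (j+1) numStalls 1).foldl (fun stall2 k => stall2 ++ [(PySem.List.pyRange (k+1) numStalls 1).foldl (fun stall3 k1 => stall3 ++ [(PySem.List.pyRange (k1+1) numStalls 1).foldl (fun stall4 k2 => stall4 ++ [(PySem.List.pyRange (k2+1) numStalls 1).foldl (fun stall5 _k3 => stall5 ++ [(0 : Int)]) []]) []]) []]) []]) []]) []]) []]) []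

-- ===== PORT B =====
-- build(depth, start) of Source B, unrolled by depth (the return type changes with depth)
def pvBuild1 (numStalls start : Int) : List Int :=
  (PySem.List.pyRange (start+1) numStalls 1).map (fun _ => 0)
def pvBuild2 (numStalls start : Int) : List (List Int) :=
  (PySem.List.pyRange (start+1) numStalls 1).map (pvBuild1 numStalls)
def pvBuild3 (numStalls start : Int) : List (List (List Int)) :=
  (PySem.List.pyRange (start+1) numStalls 1).map (pvBuild2 numStalls)
def pvBuild4 (numStalls start : Int) : List (List (List (List Int))) :=
  (PySem.List.pyRange (start+1) numStalls 1).map (pvBuild3 numStalls)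
def pvBuild5 (numStalls start : Int) : List (List (List (List (List Int)))) :=
  (PySem.List.pyRange (start+1) numStalls 1).map (pvBuild4 numStalls)
def pvBuild6 (numStalls start : Int) : List (List (List (List (List (List Int))))) :=
  (PySem.List.pyRange (start+1) numStalls 1).map (pvBuild5 numStalls)

def init_six_alt (num_shaders : Int) (num_sched : Int) (numStalls : Int) : List (List (List (List (List (List (List (List Int))))))) :=
  (PySem.List.pyRange 0 num_shaders 1).map (fun _ =>
    (PySem.List.pyRange 0 num_sched 1).map (fun _ => pvBuild6 numStalls (-1)))

-- ===== PRECONDITION & SPEC =====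
def Spec_init_six (num_shaders : Int) (num_sched : Int) (numStalls : Int) (out : List (List (List (List (List (List (List (List Int)))))))) : Prop := out = init_six_alt num_shaders num_sched numStalls
instance (num_shaders : Int) (num_sched : Int) (numStalls : Int) (out : PvOut) : Decidable (Spec_init_six num_shaders num_sched numStalls out) := by unfold Spec_init_six; infer_instance

-- ===== CLAIM (what is proved, stated in full; the proofs are below) =====
def Claim_equal_init_six : Prop := ∀ (num_shaders : Int) (num_sched : Int) (numStalls : Int), Dom_init_six num_shaders num_sched numStalls → Spec_init_six num_shaders num_sched numStalls (init_six num_shaders num_sched numStalls)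

-- ===== LEMMAS AND PROOFS =====

-- append-accumulator loop = map
theorem pvFoldl_append_map {α β : Type} (l : List α) (f : α → β) (init : List β) :
    l.foldl (fun acc x => acc ++ [f x]) init = init ++ l.map f := by
  induction l generalizing init with
  | nil => simp
  | cons x xs ih => simp [List.foldl, ih]

theorem pvM1 (n s : Int) : (PySem.List.pyRange (s+1) n 1).map (fun (_ : Int) => (0 : Int)) = pvBuild1 n s := rfl

theorem pvM2 (n s : Int) :
    (PySem.List.pyRange (s+1) n 1).map (fun c => (PySem.List.pyRange (c+1) n 1).map (fun (_ : Int) => (0 : Int))) = pvBuild2 n s := by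
  simp only [pvBuild2]
  exact List.map_congr_left (fun x _ => pvM1 n x)

theorem pvM3 (n s : Int) :
    (PySem.List.pyRange (s+1) n 1).map (fun b => (PySem.List.pyRange (b+1) n 1).map (fun c => (PySem.List.pyRange (c+1) n 1).map (fun (_ : Int) => (0 : Int)))) = pvBuild3 n s := by
  simp only [pvBuild3]
  exact List.map_congr_left (fun x _ => pvM2 n x)

theorem pvM4 (n s : Int) :
    (PySem.List.pyRange (s+1) n 1).map (fun a => (PySem.List.pyRange (a+1) n 1).map (fun b => (PySem.List.pyRange (b+1) n 1).map (fun c => (PySem.List.pyRange (c+1) n 1).map (fun (_ : Int) => (0 : Int))))) = pvBuild4 n s := by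
  simp only [pvBuild4]
  exact List.map_congr_left (fun x _ => pvM3 n x)

theorem pvM5 (n s : Int) :
    (PySem.List.pyRange (s+1) n 1).map (fun k => (PySem.List.pyRange (k+1) n 1).map (fun a => (PySem.List.pyRange (a+1) n 1).map (fun b => (PySem.List.pyRange (b+1) n 1).map (fun c => (PySem.List.pyRange (c+1) n 1).map (fun (_ : Int) => (0 : Int)))))) = pvBuild5 n s := by
  simp only [pvBuild5]
  exact List.map_congr_left (fun x _ => pvM4 n x)

theorem init_six_spec : Claim_equal_init_six := by
  intro num_shaders num_sched numStalls _
  show init_six num_shaders num_sched numStalls = init_six_alt num_shaders num_sched numStalls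
  unfold init_six init_six_alt
  simp only [pvFoldl_append_map, List.nil_append]
  refine List.map_congr_left (fun _ _ => List.map_congr_left (fun _ _ => ?_))
  have h0 : (-1 : Int) + 1 = 0 := by norm_num
  simp only [pvBuild6, h0]
  exact List.map_congr_left (fun i _ => pvM5 numStalls i)
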